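-- pv_equiv track=rewrite | github.com/xhamyd/dbuzzell-scripts | mbti.py | validate_letters
-- ===== SOURCE A (Python) =====
-- LETTERS = [("E", "I"),  # Extroverted, Introverted
--            ("N", "S"),  # iNtuition, Sensing
--            ("F", "T"),  # Feeling, Thinking
--            ("J", "P")]  # Judging, Perceiving
--
-- def validate_letters(letters):
--     if not isinstance(letters, str) or not letters.isupper() or len(letters) != len(LETTERS):
--         return False
--
--     for i, letter in enumerate(letters):
--         valid_letters = LETTERS[i]
--         if letter not in valid_letters:
--             return False
--     return True
-- ===== SOURCE B (Python) =====
-- LETTERS = [("E", "I"),  # Extroverted, Introverted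
--            ("N", "S"),  # iNtuition, Sensing
--            ("F", "T"),  # Feeling, Thinking
--            ("J", "P")]  # Judging, Perceiving
--
-- # All 16 valid MBTI type strings, enumerated once at module load.
-- VALID = {a + b + c + d
--          for a in LETTERS[0]
--          for b in LETTERS[1]
--          for c in LETTERS[2]
--          for d in LETTERS[3]}
--
-- def validate_letters(letters):
--     return letters in VALID
-- ===== Notes on version B (the rewrite author's own statement) =====
-- stated objective: idiomatic
-- what changed: Replaces the per-position loop (isupper + length + per-index tuple membership) by a single membership test of the whole string against the 16 valid MBTI strings enumerated once at module load.
import Mathlib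
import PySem

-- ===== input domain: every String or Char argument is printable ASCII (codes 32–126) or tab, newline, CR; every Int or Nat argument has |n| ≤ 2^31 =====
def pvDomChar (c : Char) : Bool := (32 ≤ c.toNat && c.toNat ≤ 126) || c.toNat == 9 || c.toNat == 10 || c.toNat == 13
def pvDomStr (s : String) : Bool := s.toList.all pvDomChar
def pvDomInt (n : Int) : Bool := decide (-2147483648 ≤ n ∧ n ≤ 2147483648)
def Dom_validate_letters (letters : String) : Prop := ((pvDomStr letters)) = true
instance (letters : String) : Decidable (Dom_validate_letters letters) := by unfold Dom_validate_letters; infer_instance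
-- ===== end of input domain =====

-- B replaces A's per-position membership loop by one whole-string lookup in the
-- enumerated set of the 16 valid MBTI strings (objective: idiomatic).

-- ===== PORT A =====
def pvLETTERS : List (Char × Char) := [('E', 'I'), ('N', 'S'), ('F', 'T'), ('J', 'P')]

-- Python str.isupper(): at least one cased character and no lowercase cased character;
-- exact on the ASCII domain, where the cased characters are exactly 'a'-'z' and 'A'-'Z'.
def pvStrIsupper (s : String) : Bool :=
  s.toList.any (fun c => PySem.Chars.isupper c || PySem.Chars.islower c) &&
  s.toList.all (fun c => !PySem.Chars.islower c)

-- the 'for i, letter in enumerate(letters)' loop of A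
def pvLoopA : List (Int × Char) → Bool
  | [] => true
  | (i, c) :: rest =>
    match PySem.List.pyGet? pvLETTERS i with
    | none => false   -- unreachable: the length guard makes every index in range
    | some vl => if !(c == vl.1 || c == vl.2) then false else pvLoopA rest

def validate_letters (letters : String) : Bool :=
  -- 'not isinstance(letters, str)' is vacuous under the type convention (letters : String)
  if !pvStrIsupper letters || PySem.Str.len letters ≠ 4 then false
  else pvLoopA (PySem.List.enumerate letters.toList)

-- ===== PORT B =====
-- VALID = {a+b+c+d for a in LETTERS[0] for b in LETTERS[1] for c in LETTERS[2] for d in LETTERS[3]}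
def pvVALID : PySem.Set String :=
  PySem.Set.ofList (["E", "I"].flatMap fun a => ["N", "S"].flatMap fun b =>
    ["F", "T"].flatMap fun c => ["J", "P"].flatMap fun d => [a ++ b ++ c ++ d])

def validate_letters_alt (letters : String) : Bool := pvVALID.contains letters

-- ===== PRECONDITION & SPEC =====
def Spec_validate_letters (letters : String) (out : Bool) : Prop := out = validate_letters_alt letters
instance (letters : String) (out : Bool) : Decidable (Spec_validate_letters letters out) := by unfold Spec_validate_letters; infer_instance

-- ===== CLAIM (what is proved, stated in full; the proofs are below) =====
def Claim_equal_validate_letters : Prop := ∀ (letters : String), Dom_validate_letters letters → Spec_validate_letters letters (validate_letters letters)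

-- ===== LEMMAS AND PROOFS =====

lemma pvVALID_eq : pvVALID = ["ENFJ", "ENFP", "ENTJ", "ENTP", "ESFJ", "ESFP", "ESTJ", "ESTP",
    "INFJ", "INFP", "INTJ", "INTP", "ISFJ", "ISFP", "ISTJ", "ISTP"] := by decide

lemma alt_true_iff (s : String) : validate_letters_alt s = true ↔
    s = "ENFJ" ∨ s = "ENFP" ∨ s = "ENTJ" ∨ s = "ENTP" ∨ s = "ESFJ" ∨ s = "ESFP" ∨
    s = "ESTJ" ∨ s = "ESTP" ∨ s = "INFJ" ∨ s = "INFP" ∨ s = "INTJ" ∨ s = "INTP" ∨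
    s = "ISFJ" ∨ s = "ISFP" ∨ s = "ISTJ" ∨ s = "ISTP" := by
  rw [validate_letters_alt, PySem.Set.contains_iff, pvVALID_eq]
  simp [PySem.Set]

lemma ofList_eq_lit (l : List Char) (t : String) :
    String.ofList l = t ↔ l = t.toList := by
  constructor
  · intro h; simpa using congrArg String.toList h
  · intro h; subst h; simp

lemma alt_true_iff' (l : List Char) : validate_letters_alt (String.ofList l) = true ↔
    l = ['E','N','F','J'] ∨ l = ['E','N','F','P'] ∨ l = ['E','N','T','J'] ∨ l = ['E','N','T','P'] ∨
    l = ['E','S','F','J'] ∨ l = ['E','S','F','P'] ∨ l = ['E','S','T','J'] ∨ l = ['E','S','T','P'] ∨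
    l = ['I','N','F','J'] ∨ l = ['I','N','F','P'] ∨ l = ['I','N','T','J'] ∨ l = ['I','N','T','P'] ∨
    l = ['I','S','F','J'] ∨ l = ['I','S','F','P'] ∨ l = ['I','S','T','J'] ∨ l = ['I','S','T','P'] := by
  rw [alt_true_iff]
  simp only [ofList_eq_lit]
  exact Iff.rfl

lemma key (l : List Char) :
    validate_letters (String.ofList l) = validate_letters_alt (String.ofList l) := by
  rw [Bool.eq_iff_iff, alt_true_iff']
  match l with
  | [] => simp [validate_letters, PySem.Str.len]
  | [a] => simp [validate_letters, PySem.Str.len]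
  | [a, b] => simp [validate_letters, PySem.Str.len]
  | [a, b, c] => simp [validate_letters, PySem.Str.len]
  | a :: b :: c :: d :: e :: rest =>
    constructor
    · intro h
      exfalso
      simp only [validate_letters] at h
      split at h
      · exact absurd h (by decide)
      · rename_i hg
        simp [PySem.Str.len] at hg
        omega
    · intro h
      exfalso
      rcases h with h | h | h | h | h | h | h | h | h | h | h | h | h | h | h | h <;> simp_all
  | [a, b, c, d] =>
    constructor
    · intro h
      simp only [validate_letters] at h
      split at h
      · exact absurd h (by decide)
      · simp only [String.toList_ofList, PySem.List.enumerate, pvLoopA,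
          PySem.List.pyGet?, pvLETTERS, PySem.List.pyIdx?] at h
        norm_num [show (2 : Int).toNat = 2 from rfl, show (3 : Int).toNat = 3 from rfl] at h
        obtain ⟨ha, hb, hc, hd⟩ := h
        rcases ha with rfl | rfl <;> rcases hb with rfl | rfl <;>
          rcases hc with rfl | rfl <;> rcases hd with rfl | rfl <;> decide
    · intro h
      rcases h with h | h | h | h | h | h | h | h | h | h | h | h | h | h | h | h <;>
        (simp only [List.cons.injEq, and_true] at h
         obtain ⟨rfl, rfl, rfl, rfl, -⟩ := h
         decide)

-- ===== VERDICT (by name: the statement is the Claim_ definition above) =====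
theorem validate_letters_spec : Claim_equal_validate_letters := by
  intro s _
  unfold Spec_validate_letters
  have h := key s.toList
  simpa using h
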